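-- pv_equiv track=rewrite | github.com/Ananta-dot/PB_POC | motifs.py | motif_ladder
-- ===== SOURCE A (Python) =====
-- from typing import List, Tuple
--
-- Seq  = List[int]
--
-- def motif_ladder(n: int) -> Seq:
--     # spreads endpoints to create corner stacks; then trimmed to 2 of each
--     out=[]
--     a, b = 1, 2
--     while len(out) < 2*n:
--         out += [a, b if b<=n else a]
--         a += 1
--         b += 1
--         if a > n: a = n
--         if b > n: b = n
--     cnt = {i:0 for i in range(1,n+1)}
--     fixed=[]
--     for x in out:
--         if cnt[x] < 2:
--             fixed.append(x); cnt[x]+=1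
--     for i in range(1,n+1):
--         while cnt[i] < 2:
--             fixed.append(i); cnt[i]+=1
--     return fixed[:2*n]
-- ===== SOURCE B (Python) =====
-- from typing import List
--
-- Seq = List[int]
--
-- def motif_ladder(n: int) -> Seq:
--     # direct closed form: 1, then each of 2..n twice, then a final 1
--     if n < 1:
--         return []
--     mid = [x for i in range(2, n + 1) for x in (i, i)]
--     return [1] + mid + [1]
-- ===== Notes on version B (the rewrite author's own statement) =====
-- stated objective: simpler
-- what changed: Replaces A's while-loop endpoint simulation, dict-based count-filter pass and padding pass with a direct closed-form construction of the ladder (empty for non-positive n, else an opening one, each middle value twice, a closing one).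
import Mathlib
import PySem

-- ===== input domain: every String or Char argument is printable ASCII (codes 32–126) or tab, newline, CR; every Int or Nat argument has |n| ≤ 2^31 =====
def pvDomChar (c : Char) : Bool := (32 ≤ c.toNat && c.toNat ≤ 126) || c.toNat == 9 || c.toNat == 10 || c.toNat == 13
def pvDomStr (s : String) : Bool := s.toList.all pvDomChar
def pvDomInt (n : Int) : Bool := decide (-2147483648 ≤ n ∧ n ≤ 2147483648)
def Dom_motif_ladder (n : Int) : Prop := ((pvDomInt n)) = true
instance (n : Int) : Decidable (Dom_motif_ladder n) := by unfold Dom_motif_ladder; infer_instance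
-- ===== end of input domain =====

-- B replaces A's while-loop simulation, count-filter pass and padding pass by the
-- direct closed-form construction of the same ladder (objective: simpler).

-- ===== PORT A =====
-- 'if a > n: a = n'
def mlClamp (n x : Int) : Int := if x > n then n else x

-- the while-loop: out grows by 2 each iteration until len(out) ≥ 2*n
def mlLoop (n : Int) (out : List Int) (a b : Int) : List Int :=
  if (out.length : Int) < 2 * n then
    mlLoop n (out ++ [a, if b ≤ n then b else a]) (mlClamp n (a + 1)) (mlClamp n (b + 1))
  else out
termination_by (2 * n - out.length).toNat
decreasing_by simp only [List.length_append, List.length_cons, List.length_nil]; omega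

-- cnt = {i:0 for i in range(1,n+1)}
def mlCnt0 (n : Int) : PySem.Dict Int Int :=
  (PySem.List.pyRange 1 (n + 1) 1).foldl (fun d i => d.insert i 0) PySem.Dict.empty

-- one step of the 'for x in out' filter pass (cnt[x] ported as getD; every x is a key)
def mlStep (st : List Int × PySem.Dict Int Int) (x : Int) : List Int × PySem.Dict Int Int :=
  if st.2.getD x 0 < 2 then (st.1 ++ [x], st.2.insert x (st.2.getD x 0 + 1)) else st

-- 'while cnt[i] < 2: fixed.append(i); cnt[i] += 1'
def mlFill (i : Int) (fixed : List Int) (cnt : PySem.Dict Int Int) :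
    List Int × PySem.Dict Int Int :=
  if cnt.getD i 0 < 2 then mlFill i (fixed ++ [i]) (cnt.insert i (cnt.getD i 0 + 1))
  else (fixed, cnt)
termination_by (2 - cnt.getD i 0).toNat
decreasing_by simp only [PySem.Dict.getD_insert_self]; omega

def motif_ladder (n : Int) : List Int :=
  let out := mlLoop n [] 1 2
  let st := out.foldl mlStep ([], mlCnt0 n)
  let st2 := (PySem.List.pyRange 1 (n + 1) 1).foldl (fun st i => mlFill i st.1 st.2) st
  PySem.List.slice st2.1 none (some (2 * n))

-- ===== PORT B =====
def motif_ladder_alt (n : Int) : List Int :=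
  if n < 1 then []
  else [1] ++ (PySem.List.pyRange 2 (n + 1) 1).flatMap (fun i => [i, i]) ++ [1]

-- ===== PRECONDITION & SPEC =====
def Spec_motif_ladder (n : Int) (out : List Int) : Prop := out = motif_ladder_alt n
instance (n : Int) (out : List Int) : Decidable (Spec_motif_ladder n out) := by unfold Spec_motif_ladder; infer_instance

-- ===== CLAIM (what is proved, stated in full; the proofs are below) =====
def Claim_equal_motif_ladder : Prop := ∀ (n : Int), Dom_motif_ladder n → Spec_motif_ladder n (motif_ladder n)

-- ===== LEMMAS AND PROOFS =====

-- the list the while-loop appends, by remaining iteration count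
def mlGen (n a b : Int) : Nat → List Int
  | 0 => []
  | m + 1 => a :: (if b ≤ n then b else a) :: mlGen n (mlClamp n (a + 1)) (mlClamp n (b + 1)) m

-- [a, a, a+1, a+1, …] with k distinct values
def mlDbl (a : Int) : Nat → List Int
  | 0 => []
  | k + 1 => a :: a :: mlDbl (a + 1) k

theorem mlLoop_eq_gen (n : Int) : ∀ (m : Nat) (out : List Int) (a b : Int),
    (out.length : Int) = 2 * n - 2 * m → mlLoop n out a b = out ++ mlGen n a b m := by
  intro m
  induction m with
  | zero =>
    intro out a b h
    rw [mlLoop]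
    simp [mlGen]
    omega
  | succ m ih =>
    intro out a b h
    rw [mlLoop]
    have hc : (out.length : Int) < 2 * n := by push_cast at h ⊢; omega
    rw [if_pos hc, ih _ _ _ (by simp; push_cast at h ⊢; omega)]
    simp [mlGen]

theorem mlGen_eq_dbl (n : Int) : ∀ (k : Nat) (a : Int), 1 ≤ k → a + k = n →
    mlGen n a (a + 1) (k + 1) = a :: (mlDbl (a + 1) k ++ [n]) := by
  intro k
  induction k with
  | zero => omega
  | succ k ih =>
    intro a _ hk
    by_cases hk1 : k = 0
    · subst hk1
      have ha : a + 1 = n := by push_cast at hk; omega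
      simp only [mlGen, mlDbl, mlClamp]
      rw [if_pos (by omega : a + 1 ≤ n)]
      split_ifs with h1 h2 h3 <;> simp <;> omega
    · have hle : a + 2 ≤ n := by push_cast at hk ⊢; omega
      have step : mlGen n a (a + 1) (k + 1 + 1)
          = a :: (a + 1) :: mlGen n (a + 1) (a + 1 + 1) (k + 1) := by
        simp only [mlGen, mlClamp]
        rw [if_pos (show a + 1 ≤ n by omega), if_neg (show ¬ a + 1 > n by omega),
          if_neg (show ¬ a + 1 + 1 > n by omega)]
      rw [step, ih (a + 1) (by omega) (by push_cast at hk ⊢; omega)]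
      simp [mlDbl]

theorem getD_foldl_insert0 : ∀ (l : List Int) (d : PySem.Dict Int Int) (j : Int),
    (∀ i, d.getD i 0 = 0) → (l.foldl (fun d i => d.insert i 0) d).getD j 0 = 0 := by
  intro l
  induction l with
  | nil => intro d j h; exact h j
  | cons x xs ih =>
    intro d j h
    refine ih (d.insert x 0) j (fun i => ?_)
    rw [PySem.Dict.getD_insert]
    split_ifs with hi
    · rfl
    · exact h i

theorem mlCnt0_getD (n : Int) (j : Int) : (mlCnt0 n).getD j 0 = 0 :=
  getD_foldl_insert0 _ PySem.Dict.empty j (fun i => by simp [PySem.Dict.getD_empty])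

theorem mlDbl_length (k : Nat) : ∀ a : Int, (mlDbl a k).length = 2 * k := by
  induction k with
  | zero => simp [mlDbl]
  | succ k ih => intro a; simp [mlDbl, ih]; omega

theorem mlStep_dbl : ∀ (k : Nat) (a : Int) (fixed : List Int) (cnt : PySem.Dict Int Int),
    (∀ j, a ≤ j → cnt.getD j 0 = 0) →
    ∃ cnt', (mlDbl a k).foldl mlStep (fixed, cnt) = (fixed ++ mlDbl a k, cnt') ∧
      ∀ j, cnt'.getD j 0 = if a ≤ j ∧ j < a + k then 2 else cnt.getD j 0 := by
  intro k
  induction k with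
  | zero =>
    intro a fixed cnt _
    refine ⟨cnt, by simp [mlDbl], fun j => ?_⟩
    rw [if_neg (by push_cast; omega)]
  | succ k ih =>
    intro a fixed cnt hcnt
    have h0 : cnt.getD a 0 = 0 := hcnt a le_rfl
    have s1 : mlStep (fixed, cnt) a = (fixed ++ [a], cnt.insert a 1) := by
      simp [mlStep, h0]
    have h1 : (cnt.insert a 1).getD a 0 = 1 := by simp [PySem.Dict.getD_insert_self]
    have s2 : mlStep (fixed ++ [a], cnt.insert a 1) a
        = (fixed ++ [a] ++ [a], (cnt.insert a 1).insert a 2) := by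
      simp [mlStep, h1]
    obtain ⟨cnt', heq, hchar⟩ := ih (a + 1) (fixed ++ [a] ++ [a]) ((cnt.insert a 1).insert a 2)
      (fun j hj => by
        rw [PySem.Dict.getD_insert, if_neg (by omega), PySem.Dict.getD_insert, if_neg (by omega)]
        exact hcnt j (by omega))
    refine ⟨cnt', ?_, ?_⟩
    · simp only [mlDbl, List.foldl_cons, s1, s2, heq]
      simp
    · intro j
      rw [hchar j]
      by_cases hja : j = a
      · subst hja
        rw [if_neg (by omega), PySem.Dict.getD_insert, if_pos rfl, if_pos (by push_cast; omega)]
      · rw [PySem.Dict.getD_insert, if_neg hja, PySem.Dict.getD_insert, if_neg hja]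
        push_cast
        split_ifs <;> first | rfl | omega

theorem mlFill_noop (i : Int) (fixed : List Int) (cnt : PySem.Dict Int Int)
    (h : cnt.getD i 0 = 2) : mlFill i fixed cnt = (fixed, cnt) := by
  rw [mlFill, if_neg (by omega)]

theorem mlFill_fold_noop : ∀ (l : List Int) (fixed : List Int) (cnt : PySem.Dict Int Int),
    (∀ i ∈ l, cnt.getD i 0 = 2) →
    l.foldl (fun st i => mlFill i st.1 st.2) (fixed, cnt) = (fixed, cnt) := by
  intro l
  induction l with
  | nil => intro fixed cnt _; rfl
  | cons x xs ih =>
    intro fixed cnt h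
    simp only [List.foldl_cons, mlFill_noop x fixed cnt (h x (by simp))]
    exact ih fixed cnt (fun i hi => h i (by simp [hi]))

theorem mlFlatMap_dbl : ∀ (k : Nat) (a : Int),
    (PySem.List.pyRange a (a + k) 1).flatMap (fun i => [i, i]) = mlDbl a k := by
  intro k
  induction k with
  | zero => intro a; rw [PySem.List.pyRange_one_eq_nil (by omega)]; rfl
  | succ k ih =>
    intro a
    rw [PySem.List.pyRange_one_cons (by push_cast; omega)]
    have : a + (↑(k + 1) : Int) = (a + 1) + k := by push_cast; omega
    rw [this] at *
    simp only [List.flatMap_cons, mlDbl]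
    rw [ih (a + 1)]
    rfl

theorem motif_ladder_main (n : Int) : motif_ladder n = motif_ladder_alt n := by
  rcases lt_trichotomy n 1 with hn | hn | hn
  · -- n ≤ 0 : the loop body never runs, all ranges are empty, and the negative slice is []
    have hn0 : n ≤ 0 := by omega
    simp only [motif_ladder, motif_ladder_alt, if_pos hn]
    rw [mlLoop, if_neg (by simp; omega), PySem.List.pyRange_one_eq_nil (by omega)]
    simp [PySem.List.slice]
  · -- n = 1
    subst hn
    have hout : mlLoop 1 [] 1 2 = [1, 1] := by
      have h1 := mlLoop_eq_gen 1 1 [] 1 2 (by simp)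
      simpa [mlGen] using h1
    have h2 : PySem.List.pyRange 1 (1 + 1) 1 = [1] := PySem.List.pyRange_one_singleton 1
    simp only [motif_ladder, motif_ladder_alt, hout, h2]
    have hc : (mlCnt0 1).getD 1 0 = 0 := mlCnt0_getD 1 1
    simp only [List.foldl_cons, List.foldl_nil, mlStep, hc]
    norm_num [PySem.Dict.getD_insert_self]
    rw [mlFill_noop 1 _ _ (by rw [PySem.Dict.getD_insert_self])]
    rw [PySem.List.slice_to _ (by omega)]
    rfl
  · -- n ≥ 2
    have hn2 : 2 ≤ n := by omega
    set k := (n - 1).toNat with hk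
    have hkc : (k : Int) = n - 1 := by omega
    -- loop result
    have hout : mlLoop n [] 1 2 = 1 :: (mlDbl 2 k ++ [n]) := by
      have h1 : mlLoop n [] 1 2 = [] ++ mlGen n 1 2 n.toNat :=
        mlLoop_eq_gen n n.toNat [] 1 2 (by simp; omega)
      have h2 : n.toNat = k + 1 := by omega
      have h3 := mlGen_eq_dbl n k 1 (by omega) (by omega)
      rw [h1, h2]
      simpa using h3
    -- filter pass
    have hc1 : (mlCnt0 n).getD 1 0 = 0 := mlCnt0_getD n 1
    have s1 : mlStep ([], mlCnt0 n) 1 = ([1], (mlCnt0 n).insert 1 1) := by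
      simp [mlStep, hc1]
    obtain ⟨cnt', heq, hchar⟩ := mlStep_dbl k 2 [1] ((mlCnt0 n).insert 1 1)
      (fun j hj => by
        rw [PySem.Dict.getD_insert, if_neg (by omega)]; exact mlCnt0_getD n j)
    have hcn : cnt'.getD n 0 = 2 := by rw [hchar n, if_pos (by omega)]
    have hfilter : (mlLoop n [] 1 2).foldl mlStep ([], mlCnt0 n)
        = (1 :: mlDbl 2 k, cnt') := by
      rw [hout]
      simp only [List.foldl_cons, s1]
      rw [show (mlDbl 2 k ++ [n]) = mlDbl 2 k ++ [n] from rfl, List.foldl_append, heq]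
      simp [mlStep, hcn]
    -- fill pass
    have hc1' : cnt'.getD 1 0 = 1 := by
      rw [hchar 1, if_neg (by omega), PySem.Dict.getD_insert_self]
    have hfill1 : mlFill 1 (1 :: mlDbl 2 k) cnt'
        = (1 :: mlDbl 2 k ++ [1], cnt'.insert 1 (cnt'.getD 1 0 + 1)) := by
      rw [mlFill, if_pos (by omega), mlFill_noop]
      rw [PySem.Dict.getD_insert_self, hc1']
      norm_num
    have hfill : (PySem.List.pyRange 1 (n + 1) 1).foldl
        (fun st i => mlFill i st.1 st.2) (1 :: mlDbl 2 k, cnt')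
        = (1 :: mlDbl 2 k ++ [1], cnt'.insert 1 (cnt'.getD 1 0 + 1)) := by
      rw [PySem.List.pyRange_one_cons (by omega)]
      simp only [List.foldl_cons, hfill1]
      refine mlFill_fold_noop _ _ _ (fun i hi => ?_)
      rw [PySem.List.mem_pyRange_one] at hi
      rw [PySem.Dict.getD_insert, if_neg (by omega), hchar i, if_pos (by omega)]
    -- final slice
    have hlen : (1 :: mlDbl 2 k ++ [1]).length = (2 * n).toNat := by
      simp [mlDbl_length]; omega
    simp only [motif_ladder, motif_ladder_alt, if_neg (by omega : ¬ n < 1)]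
    rw [hfilter, hfill]
    rw [PySem.List.slice_to _ (by omega : (0:Int) ≤ 2 * n),
      List.take_of_length_le (le_of_eq hlen),
      show n + 1 = 2 + (k : Int) by omega, mlFlatMap_dbl k 2]
    simp

-- ===== VERDICT (by name: the statement is the Claim_ definition above) =====
theorem motif_ladder_spec : Claim_equal_motif_ladder := by
  intro n _
  unfold Spec_motif_ladder
  exact motif_ladder_main n
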